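-- pv_equiv track=rewrite | github.com/quanglong2100/Lab14-AI-Evaluation-Benchmarking | data/chunker.py | _split_bullets
-- ===== SOURCE A (Python) =====
-- from typing import Dict, List
--
-- def _split_bullets(section: str) -> List[str]:
--     lines = [l.strip() for l in section.splitlines() if l.strip()]
--
--     chunks = []
--     current = []
--
--     for line in lines:
--         if line.startswith("- "):
--             if current:
--                 chunks.append("\n".join(current))
--             current = [line]
--         else:
--             current.append(line)
--
--     if current:
--         chunks.append("\n".join(current))
--
--     return chunks
-- ===== SOURCE B (Python) =====
-- from typing import Dict, List
--
--
-- def _chunks(lines: List[str]) -> List[str]: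
--     # recursive span decomposition: first chunk = head line plus following
--     # non-bullet lines, then recurse on the remainder
--     if not lines:
--         return []
--     grp = [lines[0]]
--     rest = lines[1:]
--     while rest and not rest[0].startswith("- "):
--         grp.append(rest[0])
--         rest = rest[1:]
--     return ["\n".join(grp)] + _chunks(rest)
--
--
-- def _split_bullets(section: str) -> List[str]:
--     lines = [l.strip() for l in section.splitlines() if l.strip()]
--     return _chunks(lines)
-- ===== Notes on version B (the rewrite author's own statement) =====
-- stated objective: alternative
-- what changed: Replaces A's single accumulating fold with state (chunks, current) and a trailing flush by a recursive span decomposition: each chunk is the head line plus the following non-bullet lines, then recurse on the remainder; no mutable accumulator or final flush.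
import Mathlib
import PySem

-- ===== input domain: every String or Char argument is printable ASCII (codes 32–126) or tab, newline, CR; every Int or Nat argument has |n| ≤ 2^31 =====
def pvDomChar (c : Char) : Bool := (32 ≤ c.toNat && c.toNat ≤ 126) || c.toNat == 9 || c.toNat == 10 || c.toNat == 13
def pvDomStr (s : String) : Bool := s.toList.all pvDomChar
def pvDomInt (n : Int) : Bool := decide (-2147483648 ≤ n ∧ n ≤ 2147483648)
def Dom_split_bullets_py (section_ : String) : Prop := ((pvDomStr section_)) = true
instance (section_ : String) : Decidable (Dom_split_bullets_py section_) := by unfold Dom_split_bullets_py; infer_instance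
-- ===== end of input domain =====

-- B replaces A's accumulating fold (state (chunks, current) + trailing flush) by a
-- recursive span decomposition into head-plus-non-bullet-run chunks; objective: alternative.

-- ===== PORT A =====
-- the loop body: state is (chunks, current)
def pvStepA (st : List String × List String) (line : String) : List String × List String :=
  if PySem.Str.startswith line "- " then
    ((if st.2 = [] then st.1 else st.1 ++ [PySem.Str.join "\n" st.2]), [line])
  else
    (st.1, st.2 ++ [line])

def split_bullets_py (section_ : String) : List String :=
  let lines := ((PySem.Str.splitlines section_).filter
      (fun l => PySem.Str.strip l ≠ "")).map PySem.Str.strip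
  let st := lines.foldl pvStepA ([], [])
  if st.2 = [] then st.1 else st.1 ++ [PySem.Str.join "\n" st.2]

-- ===== PORT B =====
-- the while loop of Source B's _chunks: extend grp with non-bullet lines from rest
def pvSpanB (grp : List String) : List String → List String × List String
  | [] => (grp, [])
  | r :: rs =>
    if ¬ PySem.Str.startswith r "- " then pvSpanB (grp ++ [r]) rs
    else (grp, r :: rs)

theorem pvSpanB_snd_len (grp : List String) (rest : List String) :
    (pvSpanB grp rest).2.length ≤ rest.length := by
  induction rest generalizing grp with
  | nil => simp [pvSpanB]
  | cons r rs ih =>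
    simp only [pvSpanB]
    split
    · exact Nat.le_trans (ih _) (Nat.le_succ _)
    · simp

def pvChunksB : List String → List String
  | [] => []
  | l :: rest =>
    let p := pvSpanB [l] rest
    PySem.Str.join "\n" p.1 :: pvChunksB p.2
termination_by lines => lines.length
decreasing_by
  simpa using Nat.lt_succ_of_le (pvSpanB_snd_len [l] rest)

def split_bullets_py_alt (section_ : String) : List String :=
  let lines := ((PySem.Str.splitlines section_).filter
      (fun l => PySem.Str.strip l ≠ "")).map PySem.Str.strip
  pvChunksB lines

-- ===== PRECONDITION & SPEC =====
def Spec_split_bullets_py (section_ : String) (out : List String) : Prop := out = split_bullets_py_alt section_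
instance (section_ : String) (out : List String) : Decidable (Spec_split_bullets_py section_ out) := by unfold Spec_split_bullets_py; infer_instance

-- ===== CLAIM (what is proved, stated in full; the proofs are below) =====
def Claim_equal_split_bullets_py : Prop := ∀ (section_ : String), Dom_split_bullets_py section_ → Spec_split_bullets_py section_ (split_bullets_py section_)

-- ===== LEMMAS AND PROOFS =====

-- A's trailing flush
def pvFinish (st : List String × List String) : List String :=
  if st.2 = [] then st.1 else st.1 ++ [PySem.Str.join "\n" st.2]

-- B read at a mid-chunk point: current partial group `cur`, remaining lines `r`
def pvGoB (cur r : List String) : List String :=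
  let p := pvSpanB cur r
  PySem.Str.join "\n" p.1 :: pvChunksB p.2

theorem pvChunksB_cons (l : String) (rest : List String) :
    pvChunksB (l :: rest) = pvGoB [l] rest := by
  rw [pvChunksB]; rfl

-- loop invariant: with a nonempty current group, A's remaining fold + flush
-- produces exactly the chunks B derives from (cur, r), appended to chunks
theorem pv_key (r : List String) : ∀ (cur chunks : List String), cur ≠ [] →
    pvFinish (r.foldl pvStepA (chunks, cur)) = chunks ++ pvGoB cur r := by
  induction r with
  | nil =>
    intro cur chunks hcur
    simp [pvFinish, pvGoB, pvSpanB, pvChunksB, hcur]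
  | cons l ls ih =>
    intro cur chunks hcur
    by_cases hb : PySem.Chars.startswith l.toList ['-', ' '] = true
    · have hstep : pvStepA (chunks, cur) l
          = (chunks ++ [PySem.Str.join "\n" cur], [l]) := by
        simp [pvStepA, hb, hcur]
      rw [List.foldl_cons, hstep, ih [l] _ (by simp)]
      have hspan : pvSpanB cur (l :: ls) = (cur, l :: ls) := by
        simp [pvSpanB, hb]
      simp [pvGoB, hspan, pvChunksB_cons]
    · have hstep : pvStepA (chunks, cur) l = (chunks, cur ++ [l]) := by
        simp [pvStepA, hb]
      rw [List.foldl_cons, hstep, ih (cur ++ [l]) _ (by simp)]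
      have hspan : pvSpanB cur (l :: ls) = pvSpanB (cur ++ [l]) ls := by
        simp [pvSpanB, hb]
      simp [pvGoB, hspan]

theorem pv_fold_eq_chunks (lines : List String) :
    pvFinish (lines.foldl pvStepA ([], [])) = pvChunksB lines := by
  cases lines with
  | nil => simp [pvFinish, pvChunksB]
  | cons l ls =>
    have hstep : pvStepA ([], []) l = ([], [l]) := by
      by_cases hb : PySem.Chars.startswith l.toList ['-', ' '] = true <;> simp [pvStepA, hb]
    rw [List.foldl_cons, hstep, pv_key ls [l] [] (by simp), pvChunksB_cons]
    simp

-- ===== VERDICT (by name: the statement is the Claim_ definition above) =====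
theorem split_bullets_py_spec : Claim_equal_split_bullets_py := by
  intro section_ _
  unfold Spec_split_bullets_py split_bullets_py split_bullets_py_alt
  exact pv_fold_eq_chunks _
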